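-- pv_equiv track=rewrite | github.com/adam-m-jcbs/xrb-sens-datashare | kepler_python_packages/python_scripts/explosion.py | link2val
-- ===== SOURCE A (Python) =====
-- def link2val(link):
--     """
--     Convert link letter sequence into numerical value.
--     """
--     val = 0
--     for b in bytearray(link, encoding='ASCII'):
--         val = val * 50
--         # g is not allowed
--         # z is not allowed
--         # a should be 1 not 0 other wise a = aa, ab = b, ...
--         if 96 < b < 103:
--             val += b - 96
--         elif 103 < b < 122:
--             val += b - 97
--         elif 64 < b < 91:
--             val += b - 40
--         else:
--             raise KeyError(" [LINK2VAL] error: " + link)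
--     return val
-- ===== SOURCE B (Python) =====
-- def link2val(link):
--     """
--     Convert link letter sequence into numerical value.
--     """
--     val = 0
--     power = 1
--     for b in reversed(bytearray(link, encoding='ASCII')):
--         if 96 < b < 103:
--             d = b - 96
--         elif 103 < b < 122:
--             d = b - 97
--         elif 64 < b < 91:
--             d = b - 40
--         else:
--             raise KeyError(" [LINK2VAL] error: " + link)
--         val += d * power
--         power *= 50
--     return val
-- ===== Notes on version B (the rewrite author's own statement) =====
-- stated objective: alternative
-- what changed: Replaces the left-to-right Horner recurrence (val = val*50 + digit) by a reverse iteration that accumulates digit*power with an explicit running power of 50.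
import Mathlib
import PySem

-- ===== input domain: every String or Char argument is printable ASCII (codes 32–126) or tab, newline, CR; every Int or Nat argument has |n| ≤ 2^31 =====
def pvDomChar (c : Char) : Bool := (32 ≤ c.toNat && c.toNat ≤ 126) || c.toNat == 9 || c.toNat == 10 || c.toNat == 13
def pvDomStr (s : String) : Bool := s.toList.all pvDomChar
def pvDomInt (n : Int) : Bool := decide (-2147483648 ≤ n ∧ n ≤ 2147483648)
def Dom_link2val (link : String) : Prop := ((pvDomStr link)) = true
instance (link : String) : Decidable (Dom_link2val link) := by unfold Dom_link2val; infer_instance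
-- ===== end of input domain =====

-- B replaces A's left-to-right Horner loop by a reverse scan with an explicit running power of 50 (objective: alternative, same cost).

-- ===== PORT A =====
-- shared digit rule: the range ladder both Pythons use (`b` is the ASCII code);
-- the final `else` branch is where Python raises KeyError — excluded by Pre_link2val, value 0 is never relied on
def pvDigit (b : Int) : Int :=
  if 96 < b ∧ b < 103 then b - 96
  else if 103 < b ∧ b < 122 then b - 97
  else if 64 < b ∧ b < 91 then b - 40
  else 0

def link2val (link : String) : Int :=
  link.toList.foldl (fun val c => val * 50 + pvDigit (c.toNat : Int)) 0

-- ===== PORT B =====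
def link2val_alt (link : String) : Int :=
  (link.toList.reverse.foldl
    (fun (vp : Int × Int) c => (vp.1 + pvDigit (c.toNat : Int) * vp.2, vp.2 * 50)) (0, 1)).1

-- ===== PRECONDITION & SPEC =====
-- Pre_ excludes exactly the inputs on which Python's link2val raises KeyError: any character outside the three ranges.
def Pre_link2val (link : String) : Prop :=
  link.toList.all (fun c =>
    decide ((96 < c.toNat ∧ c.toNat < 103) ∨ (103 < c.toNat ∧ c.toNat < 122) ∨
            (64 < c.toNat ∧ c.toNat < 91))) = true
instance (link : String) : Decidable (Pre_link2val link) := by unfold Pre_link2val; infer_instance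

def pvWitness_link2val : String := "aBc"

def Spec_link2val (link : String) (out : Int) : Prop := out = link2val_alt link
instance (link : String) (out : Int) : Decidable (Spec_link2val link out) := by unfold Spec_link2val; infer_instance

-- ===== CLAIM (what is proved, stated in full; the proofs are below) =====
def Claim_equal_link2val : Prop := ∀ (link : String), Dom_link2val link → Pre_link2val link → Spec_link2val link (link2val link)

-- ===== LEMMAS AND PROOFS =====

-- B's running power: the second component of the accumulator after folding a list of length n is p.2 * 50^n
lemma pvSnd (l : List Char) (p : Int × Int) :
    (l.foldl (fun (vp : Int × Int) c => (vp.1 + pvDigit (c.toNat : Int) * vp.2, vp.2 * 50)) p).2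
      = p.2 * 50 ^ l.length := by
  induction l generalizing p with
  | nil => simp
  | cons c t ih => simp [ih, pow_succ]; ring

-- Horner step vs positional weights: A's fold from value v equals v * 50^n plus B's reversed fold
lemma pvMain (l : List Char) (v : Int) :
    l.foldl (fun val c => val * 50 + pvDigit (c.toNat : Int)) v
      = v * 50 ^ l.length
        + (l.reverse.foldl
            (fun (vp : Int × Int) c => (vp.1 + pvDigit (c.toNat : Int) * vp.2, vp.2 * 50)) (0, 1)).1 := by
  induction l generalizing v with
  | nil => simp
  | cons c t ih =>
      simp only [List.foldl_cons, List.reverse_cons, List.foldl_append, List.foldl_cons,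
        List.foldl_nil, List.length_cons]
      rw [ih]
      rw [pvSnd t.reverse (0, 1)]
      simp only [List.length_reverse]
      simp [pow_succ]; ring

-- ===== VERDICT (by name: the statement is the Claim_ definition above) =====
theorem link2val_spec : Claim_equal_link2val := by
  intro link _ _
  unfold Spec_link2val link2val link2val_alt
  rw [pvMain]
  simp
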